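-- pv_equiv track=rewrite | github.com/V0latix/LogiqueGames | src/linkedin_game_solver/games/queens/importers/samimsu.py | _convert_regions_to_int
-- ===== SOURCE A (Python) =====
-- def _convert_regions_to_int(grid: list[list[str]]) -> tuple[list[list[int]], dict[str, int]]:
--     mapping: dict[str, int] = {}
--     next_id = 0
--     regions_int: list[list[int]] = []
--
--     for row in grid:
--         row_int: list[int] = []
--         for cell in row:
--             if cell not in mapping:
--                 mapping[cell] = next_id
--                 next_id += 1
--             row_int.append(mapping[cell])
--         regions_int.append(row_int)
--
--     return regions_int, mapping
-- ===== SOURCE B (Python) =====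
-- def _convert_regions_to_int(grid: list[list[str]]) -> tuple[list[list[int]], dict[str, int]]:
--     labels = dict.fromkeys(cell for row in grid for cell in row)
--     mapping = {label: i for i, label in enumerate(labels)}
--     regions_int = [[mapping[cell] for cell in row] for row in grid]
--     return regions_int, mapping
-- ===== Notes on version B (the rewrite author's own statement) =====
-- stated objective: idiomatic
-- what changed: B separates the work into staged passes: it first collects the distinct labels in first-appearance order with dict.fromkeys over the flattened grid, builds the label-to-id table by enumerate, and only then maps the grid to ids in a second pass, instead of A's single interleaved loop that grows the mapping while emitting ids.
import Mathlib
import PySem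

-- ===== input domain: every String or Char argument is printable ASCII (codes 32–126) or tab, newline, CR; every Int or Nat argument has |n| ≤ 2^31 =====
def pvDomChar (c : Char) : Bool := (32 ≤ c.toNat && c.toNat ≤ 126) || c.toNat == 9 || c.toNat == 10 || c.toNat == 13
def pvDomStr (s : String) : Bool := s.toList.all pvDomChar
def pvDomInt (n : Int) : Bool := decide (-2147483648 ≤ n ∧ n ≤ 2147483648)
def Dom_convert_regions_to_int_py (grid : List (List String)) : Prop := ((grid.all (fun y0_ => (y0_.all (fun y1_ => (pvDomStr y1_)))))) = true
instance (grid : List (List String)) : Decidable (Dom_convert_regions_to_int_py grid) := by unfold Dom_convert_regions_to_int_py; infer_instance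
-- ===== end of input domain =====

-- B stages the work: first collect the distinct labels (row-major first appearance), then build the
-- label→id table by enumeration, then translate the grid in a separate pass; A interleaves all three.

-- ===== PORT A =====
-- inner loop body: 'if cell not in mapping: mapping[cell] = next_id; next_id += 1; row_int.append(mapping[cell])'
-- (mapping[cell] is total here — the key was just ensured present — so getD 0 is exact)
def pvStepA (st : PySem.Dict String Int × Int × List Int) (cell : String) :
    PySem.Dict String Int × Int × List Int :=
  let upd := if st.1.contains cell then (st.1, st.2.1) else (st.1.insert cell st.2.1, st.2.1 + 1)
  (upd.1, upd.2, st.2.2 ++ [upd.1.getD cell 0])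

-- outer loop body: fold the row's cells starting from row_int = [], then append the row
def pvRowA (st : PySem.Dict String Int × Int × List (List Int)) (row : List String) :
    PySem.Dict String Int × Int × List (List Int) :=
  let inner := row.foldl pvStepA (st.1, st.2.1, ([] : List Int))
  (inner.1, inner.2.1, st.2.2 ++ [inner.2.2])

def convert_regions_to_int_py (grid : List (List String)) : List (List Int) × (List (String × Int)) :=
  let fin := grid.foldl pvRowA ((PySem.Dict.empty : PySem.Dict String Int), (0 : Int), ([] : List (List Int)))
  (fin.2.2, fin.1.items)

-- ===== PORT B =====
-- labels = dict.fromkeys(flattened grid) (ordered dedup); mapping = {label: i for i, label in enumerate(labels)};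
-- regions_int = [[mapping[cell] for cell in row] for row in grid] (every cell is a label, so getD 0 is exact)
def convert_regions_to_int_py_alt (grid : List (List String)) : List (List Int) × (List (String × Int)) :=
  let labels := PySem.List.dedup (grid.flatMap (fun row => row))
  let mapping := (PySem.List.enumerate labels).foldl
      (fun d p => d.insert p.2 p.1) (PySem.Dict.empty : PySem.Dict String Int)
  (grid.map (fun row => row.map (fun cell => mapping.getD cell 0)), mapping.items)

-- ===== PRECONDITION & SPEC =====
def Spec_convert_regions_to_int_py (grid : List (List String)) (out : List (List Int) × (List (String × Int))) : Prop := out = convert_regions_to_int_py_alt grid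
instance (grid : List (List String)) (out : List (List Int) × (List (String × Int))) : Decidable (Spec_convert_regions_to_int_py grid out) := by unfold Spec_convert_regions_to_int_py; infer_instance

-- ===== CLAIM (what is proved, stated in full; the proofs are below) =====
def Claim_equal_convert_regions_to_int_py : Prop := ∀ (grid : List (List String)), Dom_convert_regions_to_int_py grid → Spec_convert_regions_to_int_py grid (convert_regions_to_int_py grid)

-- ===== LEMMAS AND PROOFS =====

-- the mapping's items after the labels of `seen` have been processed
def mitems (seen : List String) : List (String × Int) :=
  (PySem.List.enumerate (PySem.List.dedup seen)).map (fun p => (p.2, p.1))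

-- dict lookup on an items list
def look (L : List (String × Int)) (c : String) : Int :=
  (PySem.Dict.mk L).getD c 0

lemma dedup_append_singleton (s : List String) (c : String) :
    PySem.List.dedup (s ++ [c])
      = if c ∈ s then PySem.List.dedup s else PySem.List.dedup s ++ [c] := by
  have : PySem.List.dedup (s ++ [c]) = PySem.Set.add (PySem.List.dedup s) c := by
    simp [PySem.List.dedup, PySem.Set.ofList, List.foldl_append]
  rw [this, PySem.Set.add]
  by_cases h : c ∈ s
  · have hc : PySem.Set.contains (PySem.List.dedup s) c = true := by
      simp [PySem.Set.contains, h]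
    rw [hc, if_pos rfl, if_pos h]
  · have hc : PySem.Set.contains (PySem.List.dedup s) c = false := by
      rw [Bool.eq_false_iff]
      intro hc
      exact absurd ((PySem.List.mem_dedup _ _).mp
        (List.contains_iff_mem.mp hc)) h
    rw [hc, if_neg (by simp), if_neg h]

lemma dedup_append (s t : List String) :
    ∃ u, PySem.List.dedup (s ++ t) = PySem.List.dedup s ++ u := by
  induction t generalizing s with
  | nil => exact ⟨[], by simp⟩
  | cons c t ih =>
    obtain ⟨u, hu⟩ := ih (s ++ [c])
    have h1 : s ++ c :: t = (s ++ [c]) ++ t := by simp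
    rw [h1, hu, dedup_append_singleton]
    by_cases h : c ∈ s
    · simp [h]
    · exact ⟨c :: u, by simp [h]⟩

lemma keys_mitems (s : List String) :
    (mitems s).map Prod.fst = PySem.List.dedup s := by
  simp [mitems, List.map_map, Function.comp_def, PySem.List.map_snd_enumerate]

lemma mitems_append_singleton (s : List String) (c : String) :
    mitems (s ++ [c]) = if c ∈ s then mitems s
      else mitems s ++ [(c, ((PySem.List.dedup s).length : Int))] := by
  unfold mitems
  rw [dedup_append_singleton]
  by_cases h : c ∈ s
  · simp [h]
  · simp [h, PySem.List.enumerate_append, PySem.List.enumerate]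

lemma look_append_left {L L2 : List (String × Int)} {c : String}
    (h : c ∈ L.map Prod.fst) : look (L ++ L2) c = look L c := by
  simp only [look, PySem.Dict.getD, PySem.Dict.get?, List.find?_append]
  obtain ⟨p, hp, hpc⟩ := List.mem_map.mp h
  have : (L.find? (fun p => p.1 == c)).isSome := by
    apply List.find?_isSome.mpr
    exact ⟨p, hp, by simp [hpc]⟩
  obtain ⟨q, hq⟩ := Option.isSome_iff_exists.mp this
  simp [hq]

lemma look_append_singleton {L : List (String × Int)} {c : String} {v : Int}
    (h : c ∉ L.map Prod.fst) : look (L ++ [(c, v)]) c = v := by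
  simp only [look, PySem.Dict.getD, PySem.Dict.get?, List.find?_append]
  have : L.find? (fun p => p.1 == c) = none := by
    apply List.find?_eq_none.mpr
    intro p hp
    simp only [beq_iff_eq]
    intro hpc
    exact h (List.mem_map.mpr ⟨p, hp, hpc⟩)
  simp [this]

lemma look_mitems_prefix {s : List String} (rest : List String) {c : String}
    (hc : c ∈ s) : look (mitems (s ++ rest)) c = look (mitems s) c := by
  obtain ⟨u, hu⟩ := dedup_append s rest
  have hm : mitems (s ++ rest)
      = mitems s ++ (PySem.List.enumerate u (0 + (PySem.List.dedup s).length)).map (fun p => (p.2, p.1)) := by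
    unfold mitems
    rw [hu, PySem.List.enumerate_append, List.map_append]
  rw [hm]
  apply look_append_left
  rw [keys_mitems]
  exact (PySem.List.mem_dedup _ _).mpr hc

lemma stepA_eq (seen rest : List String) (F : List String) (r : List Int) (c : String)
    (hF : F = seen ++ [c] ++ rest) :
    pvStepA (PySem.Dict.mk (mitems seen), ((PySem.List.dedup seen).length : Int), r) c
      = (PySem.Dict.mk (mitems (seen ++ [c])), ((PySem.List.dedup (seen ++ [c])).length : Int),
         r ++ [look (mitems F) c]) := by
  have hcont : (PySem.Dict.mk (mitems seen)).contains c = decide (c ∈ seen) := by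
    rw [PySem.Dict.contains_eq_decide_mem_keys]
    have hk : (PySem.Dict.mk (mitems seen)).keys = (mitems seen).map Prod.fst := rfl
    rw [hk, keys_mitems]
    simp
  have hFr : F = (seen ++ [c]) ++ rest := by simp [hF]
  by_cases h : c ∈ seen
  · have hval : look (mitems F) c = look (mitems seen) c := by
      rw [hFr, show (seen ++ [c]) ++ rest = seen ++ ([c] ++ rest) by simp]
      exact look_mitems_prefix ([c] ++ rest) h
    simp only [pvStepA, hcont, h, decide_true, if_true, mitems_append_singleton,
      dedup_append_singleton]
    simp only [Prod.mk.injEq, true_and, List.append_cancel_left_eq, List.cons.injEq, and_true]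
    exact hval.symm
  · have h1 : mitems (seen ++ [c]) = mitems seen ++ [(c, ((PySem.List.dedup seen).length : Int))] := by
      rw [mitems_append_singleton]; simp [h]
    have h2 : PySem.List.dedup (seen ++ [c]) = PySem.List.dedup seen ++ [c] := by
      rw [dedup_append_singleton]; simp [h]
    have hck : c ∉ (mitems seen).map Prod.fst := by
      rw [keys_mitems]; simp [h]
    have hins : (PySem.Dict.mk (mitems seen)).insert c ((PySem.List.dedup seen).length : Int)
        = PySem.Dict.mk (mitems (seen ++ [c])) := by
      rw [PySem.Dict.insert, hcont]
      simp [h, h1]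
    have hval : look (mitems F) c = ((PySem.List.dedup seen).length : Int) := by
      rw [hFr, look_mitems_prefix rest (by simp : c ∈ seen ++ [c]), h1]
      exact look_append_singleton hck
    simp only [pvStepA, hcont, h, decide_false]
    rw [hins]
    refine Prod.ext rfl (Prod.ext ?_ ?_)
    · show ((PySem.List.dedup seen).length : Int) + 1 = ((PySem.List.dedup (seen ++ [c])).length : Int)
      rw [h2]
      simp
    · show r ++ [(PySem.Dict.mk (mitems (seen ++ [c]))).getD c 0] = r ++ [look (mitems F) c]
      rw [hval]
      congr 1
      show [look (mitems (seen ++ [c])) c] = _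
      rw [h1, look_append_singleton hck]

lemma cellsA (cs : List String) (seen rest F : List String) (r : List Int)
    (hF : F = seen ++ cs ++ rest) :
    cs.foldl pvStepA (PySem.Dict.mk (mitems seen), ((PySem.List.dedup seen).length : Int), r)
      = (PySem.Dict.mk (mitems (seen ++ cs)), ((PySem.List.dedup (seen ++ cs)).length : Int),
         r ++ cs.map (fun c => look (mitems F) c)) := by
  induction cs generalizing seen r with
  | nil => simp
  | cons c cs ih =>
    rw [List.foldl_cons, stepA_eq seen (cs ++ rest) F r c (by simp [hF])]
    rw [ih (seen ++ [c]) (r ++ [look (mitems F) c]) (by simp [hF])]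
    simp

lemma rowsA (rows : List (List String)) (seen F : List String) (regs : List (List Int))
    (hF : F = seen ++ rows.flatMap (fun row => row)) :
    rows.foldl pvRowA (PySem.Dict.mk (mitems seen), ((PySem.List.dedup seen).length : Int), regs)
      = (PySem.Dict.mk (mitems F), ((PySem.List.dedup F).length : Int),
         regs ++ rows.map (fun row => row.map (fun c => look (mitems F) c))) := by
  induction rows generalizing seen regs with
  | nil => subst hF; simp
  | cons row rows ih =>
    rw [List.foldl_cons]
    have hrow : pvRowA (PySem.Dict.mk (mitems seen), ((PySem.List.dedup seen).length : Int), regs) row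
        = (PySem.Dict.mk (mitems (seen ++ row)), ((PySem.List.dedup (seen ++ row)).length : Int),
           regs ++ [row.map (fun c => look (mitems F) c)]) := by
      unfold pvRowA
      rw [show ((PySem.Dict.mk (mitems seen), ((PySem.List.dedup seen).length : Int),
            regs) : PySem.Dict String Int × Int × List (List Int)).1 = PySem.Dict.mk (mitems seen) from rfl]
      rw [cellsA row seen (rows.flatMap (fun row => row)) F ([] : List Int) (by simp [hF])]
      simp
    rw [hrow, ih (seen ++ row) _ (by simp [hF])]
    simp

lemma bMapping_eq (F : List String) :
    (PySem.List.enumerate (PySem.List.dedup F)).foldl (fun d p => d.insert p.2 p.1)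
      (PySem.Dict.empty : PySem.Dict String Int) = PySem.Dict.mk (mitems F) := by
  apply PySem.Dict.ext
  rw [PySem.Dict.items_foldl_insert_fresh (PySem.List.enumerate (PySem.List.dedup F))
    (fun p => p.2) (fun p => p.1) PySem.Dict.empty
    (by intro a _; exact PySem.Dict.contains_empty _)
    (by rw [PySem.List.map_snd_enumerate]; exact PySem.List.nodup_dedup F)]
  simp [mitems, PySem.Dict.empty]

-- ===== VERDICT (by name: the statement is the Claim_ definition above) =====
theorem convert_regions_to_int_py_spec : Claim_equal_convert_regions_to_int_py := by
  intro grid _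
  unfold Spec_convert_regions_to_int_py
  have hA : convert_regions_to_int_py grid
      = (grid.map (fun row => row.map (fun c => look (mitems (grid.flatMap (fun row => row))) c)),
         mitems (grid.flatMap (fun row => row))) := by
    unfold convert_regions_to_int_py
    rw [show ((PySem.Dict.empty : PySem.Dict String Int), (0 : Int), ([] : List (List Int)))
        = (PySem.Dict.mk (mitems []), ((PySem.List.dedup ([] : List String)).length : Int),
           ([] : List (List Int))) from rfl]
    rw [rowsA grid [] (grid.flatMap (fun row => row)) [] (by simp)]
    simp
  have hB : convert_regions_to_int_py_alt grid
      = (grid.map (fun row => row.map (fun c => look (mitems (grid.flatMap (fun row => row))) c)),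
         mitems (grid.flatMap (fun row => row))) := by
    unfold convert_regions_to_int_py_alt
    simp only [bMapping_eq]
    rfl
  rw [hA, hB]
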